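-- pv_equiv track=rewrite | github.com/oliverjmfeix-sketch/ValenceV3 | app/scripts/phase_c_commit_3_parallel_run.py | order_rule_ids
-- ===== SOURCE A (Python) =====
-- def order_rule_ids(rule_ids: list[str]) -> list[str]:
--     """Return rule IDs in the execution order the converter uses:
--     1. Mapping-derived rules (rule_conv_<source_entity_type>) — including the
--        basket-level builder rules and rule_conv_jcrew_blocker
--     2. b_aggregate (rule_conv_builder_b_aggregate)
--     3. Builder sub-source rules (rule_conv_builder_builder_source_*)
--     4. Defeater rules (rule_conv_*_defeater)
--     5. Pilot (rule_general_rp_basket) — slot anywhere; place last for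
--        cleanest report ordering
--     """
--     mapping = []
--     b_agg = []
--     sub_source = []
--     defeaters = []
--     pilot = []
--     for rid in rule_ids:
--         if rid == "rule_general_rp_basket":
--             pilot.append(rid)
--         elif rid == "rule_conv_builder_b_aggregate":
--             b_agg.append(rid)
--         elif rid.startswith("rule_conv_builder_builder_source_"):
--             sub_source.append(rid)
--         elif rid.endswith("_defeater"):
--             defeaters.append(rid)
--         else:
--             mapping.append(rid)
--     return mapping + b_agg + sub_source + defeaters + pilot
-- ===== SOURCE B (Python) =====
-- def order_rule_ids(rule_ids: list[str]) -> list[str]: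
--     """Stable sort by a category priority; same order as A's bucket concatenation."""
--     def priority(rid: str) -> int:
--         if rid == "rule_general_rp_basket":
--             return 4
--         if rid == "rule_conv_builder_b_aggregate":
--             return 1
--         if rid.startswith("rule_conv_builder_builder_source_"):
--             return 2
--         if rid.endswith("_defeater"):
--             return 3
--         return 0
--     return sorted(rule_ids, key=priority)
-- ===== Notes on version B (the rewrite author's own statement) =====
-- stated objective: simpler
-- what changed: Replaced the five explicit bucket lists and their concatenation by a single stable sort keyed on a 0-4 category priority function; Python's sort stability preserves within-category order.
import Mathlib
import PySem

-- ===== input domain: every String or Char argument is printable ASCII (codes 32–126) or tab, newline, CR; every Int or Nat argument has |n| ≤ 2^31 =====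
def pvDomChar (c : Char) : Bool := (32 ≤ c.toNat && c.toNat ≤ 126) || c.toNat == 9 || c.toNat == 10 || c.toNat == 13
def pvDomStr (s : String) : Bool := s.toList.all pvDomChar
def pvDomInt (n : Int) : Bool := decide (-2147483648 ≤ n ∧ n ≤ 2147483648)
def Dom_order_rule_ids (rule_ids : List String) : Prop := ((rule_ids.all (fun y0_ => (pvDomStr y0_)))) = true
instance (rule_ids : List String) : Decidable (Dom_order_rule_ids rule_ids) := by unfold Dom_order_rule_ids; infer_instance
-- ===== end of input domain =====

-- B replaces A's five explicit bucket lists by a single stable sort keyed on a 0-4 priority (simpler).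

-- ===== PORT A =====
-- A's loop over rule_ids appending each rid to one of five bucket lists, then their concatenation.
def order_rule_ids (rule_ids : List String) : List String :=
  let s := rule_ids.foldl
    (fun (acc : List String × List String × List String × List String × List String) rid =>
      let (mapping, b_agg, sub_source, defeaters, pilot) := acc
      if rid = "rule_general_rp_basket" then
        (mapping, b_agg, sub_source, defeaters, pilot ++ [rid])
      else if rid = "rule_conv_builder_b_aggregate" then
        (mapping, b_agg ++ [rid], sub_source, defeaters, pilot)
      else if PySem.Str.startswith rid "rule_conv_builder_builder_source_" then
        (mapping, b_agg, sub_source ++ [rid], defeaters, pilot)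
      else if PySem.Str.endswith rid "_defeater" then
        (mapping, b_agg, sub_source, defeaters ++ [rid], pilot)
      else
        (mapping ++ [rid], b_agg, sub_source, defeaters, pilot))
    ([], [], [], [], [])
  s.1 ++ s.2.1 ++ s.2.2.1 ++ s.2.2.2.1 ++ s.2.2.2.2

-- ===== PORT B =====
-- B's priority helper: the same ordered checks as A, returning the category rank.
def pvPriority (rid : String) : Int :=
  if rid = "rule_general_rp_basket" then 4
  else if rid = "rule_conv_builder_b_aggregate" then 1
  else if PySem.Str.startswith rid "rule_conv_builder_builder_source_" then 2
  else if PySem.Str.endswith rid "_defeater" then 3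
  else 0

def order_rule_ids_alt (rule_ids : List String) : List String :=
  PySem.List.sorted rule_ids pvPriority false

-- ===== PRECONDITION & SPEC =====
def Spec_order_rule_ids (rule_ids : List String) (out : List String) : Prop := out = order_rule_ids_alt rule_ids
instance (rule_ids : List String) (out : List String) : Decidable (Spec_order_rule_ids rule_ids out) := by unfold Spec_order_rule_ids; infer_instance

-- ===== CLAIM (what is proved, stated in full; the proofs are below) =====
def Claim_equal_order_rule_ids : Prop := ∀ (rule_ids : List String), Dom_order_rule_ids rule_ids → Spec_order_rule_ids rule_ids (order_rule_ids rule_ids)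

-- ===== LEMMAS AND PROOFS =====

-- the five category filters
def pvF (i : Int) (xs : List String) : List String := xs.filter (fun r => decide (pvPriority r = i))

lemma pvPriority_range (r : String) :
    pvPriority r = 0 ∨ pvPriority r = 1 ∨ pvPriority r = 2 ∨ pvPriority r = 3 ∨ pvPriority r = 4 := by
  unfold pvPriority; split_ifs <;> simp

-- A's loop, characterised: each bucket is a filter of the input
lemma pvA_foldl (xs : List String) (m b ss d p : List String) :
    xs.foldl
      (fun (acc : List String × List String × List String × List String × List String) rid =>
        let (mapping, b_agg, sub_source, defeaters, pilot) := acc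
        if rid = "rule_general_rp_basket" then
          (mapping, b_agg, sub_source, defeaters, pilot ++ [rid])
        else if rid = "rule_conv_builder_b_aggregate" then
          (mapping, b_agg ++ [rid], sub_source, defeaters, pilot)
        else if PySem.Str.startswith rid "rule_conv_builder_builder_source_" then
          (mapping, b_agg, sub_source ++ [rid], defeaters, pilot)
        else if PySem.Str.endswith rid "_defeater" then
          (mapping, b_agg, sub_source, defeaters ++ [rid], pilot)
        else
          (mapping ++ [rid], b_agg, sub_source, defeaters, pilot))
      (m, b, ss, d, p)
    = (m ++ pvF 0 xs, b ++ pvF 1 xs, ss ++ pvF 2 xs, d ++ pvF 3 xs, p ++ pvF 4 xs) := by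
  induction xs generalizing m b ss d p with
  | nil => simp [pvF]
  | cons x t ih =>
    simp only [List.foldl_cons]
    by_cases h1 : x = "rule_general_rp_basket"
    · have hp : pvPriority x = 4 := by unfold pvPriority; rw [if_pos h1]
      rw [if_pos h1, ih]
      simp [pvF, hp]
    · rw [if_neg h1]
      by_cases h2 : x = "rule_conv_builder_b_aggregate"
      · have hp : pvPriority x = 1 := by unfold pvPriority; rw [if_neg h1, if_pos h2]
        rw [if_pos h2, ih]
        simp [pvF, hp]
      · rw [if_neg h2]
        by_cases h3 : PySem.Str.startswith x "rule_conv_builder_builder_source_" = true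
        · have hp : pvPriority x = 2 := by unfold pvPriority; rw [if_neg h1, if_neg h2, if_pos h3]
          rw [if_pos h3, ih]
          simp [pvF, hp]
        · rw [if_neg h3]
          by_cases h4 : PySem.Str.endswith x "_defeater" = true
          · have hp : pvPriority x = 3 := by unfold pvPriority; rw [if_neg h1, if_neg h2, if_neg h3, if_pos h4]
            rw [if_pos h4, ih]
            simp [pvF, hp]
          · have hp : pvPriority x = 0 := by unfold pvPriority; rw [if_neg h1, if_neg h2, if_neg h3, if_neg h4]
            rw [if_neg h4, ih]
            simp [pvF, hp]

-- insertBy skips a prefix none of whose elements come 'before' x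
lemma pvInsertBy_append_left {α : Type} (before : α → α → Bool) (x : α) (L R : List α)
    (h : ∀ y ∈ L, before x y = false) :
    PySem.List.insertBy before x (L ++ R) = L ++ PySem.List.insertBy before x R := by
  induction L with
  | nil => simp
  | cons y t ih =>
    have hy : before x y = false := h y (by simp)
    simp only [List.cons_append, PySem.List.insertBy, hy]
    simp only [Bool.false_eq_true, if_false]
    rw [ih (fun z hz => h z (by simp [hz]))]

-- insertBy places x in front when every element comes 'after' it
lemma pvInsertBy_all_before {α : Type} (before : α → α → Bool) (x : α) (R : List α)
    (h : ∀ y ∈ R, before x y = true) :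
    PySem.List.insertBy before x R = x :: R := by
  cases R with
  | nil => simp [PySem.List.insertBy]
  | cons y t => simp [PySem.List.insertBy, h y (by simp)]

-- the stable insertion sort, characterised: concatenation of the five filters
lemma pvSorted_aux (xs : List String) (G0 G1 G2 G3 G4 : List String)
    (h0 : ∀ y ∈ G0, pvPriority y = 0) (h1 : ∀ y ∈ G1, pvPriority y = 1)
    (h2 : ∀ y ∈ G2, pvPriority y = 2) (h3 : ∀ y ∈ G3, pvPriority y = 3)
    (h4 : ∀ y ∈ G4, pvPriority y = 4) :
    xs.foldl (fun acc x => PySem.List.insertBy (fun a b => decide (pvPriority a < pvPriority b)) x acc)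
        (G0 ++ (G1 ++ (G2 ++ (G3 ++ G4))))
    = (G0 ++ pvF 0 xs) ++ ((G1 ++ pvF 1 xs) ++ ((G2 ++ pvF 2 xs) ++ ((G3 ++ pvF 3 xs) ++ (G4 ++ pvF 4 xs)))) := by
  induction xs generalizing G0 G1 G2 G3 G4 with
  | nil => simp [pvF]
  | cons x t ih =>
    simp only [List.foldl_cons]
    rcases pvPriority_range x with hx | hx | hx | hx | hx
    · rw [pvInsertBy_append_left _ x _ _ (by
        intro y hy
        simp [hx, h0 y hy])]
      rw [pvInsertBy_all_before _ x _ (by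
        intro y hy
        simp only [List.mem_append] at hy
        rcases hy with hy | hy | hy | hy
        · simp [hx, h1 y hy]
        · simp [hx, h2 y hy]
        · simp [hx, h3 y hy]
        · simp [hx, h4 y hy])]
      have := ih (G0 ++ [x]) G1 G2 G3 G4
        (by intro y hy; rcases List.mem_append.1 hy with hy | hy; exact h0 y hy; simp at hy; subst hy; exact hx) h1 h2 h3 h4
      rw [show G0 ++ (x :: (G1 ++ (G2 ++ (G3 ++ G4)))) = (G0 ++ [x]) ++ (G1 ++ (G2 ++ (G3 ++ G4))) by simp]
      rw [this]
      simp [pvF, hx]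
    · rw [show G0 ++ (G1 ++ (G2 ++ (G3 ++ G4))) = (G0 ++ G1) ++ (G2 ++ (G3 ++ G4)) by simp]
      rw [pvInsertBy_append_left _ x _ _ (by
        intro y hy
        simp only [List.mem_append] at hy
        rcases hy with hy | hy
        · simp [hx, h0 y hy]
        · simp [hx, h1 y hy])]
      rw [pvInsertBy_all_before _ x _ (by
        intro y hy
        simp only [List.mem_append] at hy
        rcases hy with hy | hy | hy
        · simp [hx, h2 y hy]
        · simp [hx, h3 y hy]
        · simp [hx, h4 y hy])]
      have := ih G0 (G1 ++ [x]) G2 G3 G4 h0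
        (by intro y hy; rcases List.mem_append.1 hy with hy | hy; exact h1 y hy; simp at hy; subst hy; exact hx) h2 h3 h4
      rw [show (G0 ++ G1) ++ (x :: (G2 ++ (G3 ++ G4))) = G0 ++ ((G1 ++ [x]) ++ (G2 ++ (G3 ++ G4))) by simp]
      rw [this]
      simp [pvF, hx]
    · rw [show G0 ++ (G1 ++ (G2 ++ (G3 ++ G4))) = (G0 ++ G1 ++ G2) ++ (G3 ++ G4) by simp]
      rw [pvInsertBy_append_left _ x _ _ (by
        intro y hy
        simp only [List.mem_append] at hy
        rcases hy with (hy | hy) | hy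
        · simp [hx, h0 y hy]
        · simp [hx, h1 y hy]
        · simp [hx, h2 y hy])]
      rw [pvInsertBy_all_before _ x _ (by
        intro y hy
        simp only [List.mem_append] at hy
        rcases hy with hy | hy
        · simp [hx, h3 y hy]
        · simp [hx, h4 y hy])]
      have := ih G0 G1 (G2 ++ [x]) G3 G4 h0 h1
        (by intro y hy; rcases List.mem_append.1 hy with hy | hy; exact h2 y hy; simp at hy; subst hy; exact hx) h3 h4
      rw [show (G0 ++ G1 ++ G2) ++ (x :: (G3 ++ G4)) = G0 ++ (G1 ++ ((G2 ++ [x]) ++ (G3 ++ G4))) by simp]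
      rw [this]
      simp [pvF, hx]
    · rw [show G0 ++ (G1 ++ (G2 ++ (G3 ++ G4))) = (G0 ++ G1 ++ G2 ++ G3) ++ G4 by simp]
      rw [pvInsertBy_append_left _ x _ _ (by
        intro y hy
        simp only [List.mem_append] at hy
        rcases hy with ((hy | hy) | hy) | hy
        · simp [hx, h0 y hy]
        · simp [hx, h1 y hy]
        · simp [hx, h2 y hy]
        · simp [hx, h3 y hy])]
      rw [pvInsertBy_all_before _ x _ (by intro y hy; simp [hx, h4 y hy])]
      have := ih G0 G1 G2 (G3 ++ [x]) G4 h0 h1 h2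
        (by intro y hy; rcases List.mem_append.1 hy with hy | hy; exact h3 y hy; simp at hy; subst hy; exact hx) h4
      rw [show (G0 ++ G1 ++ G2 ++ G3) ++ (x :: G4) = G0 ++ (G1 ++ (G2 ++ ((G3 ++ [x]) ++ G4))) by simp]
      rw [this]
      simp [pvF, hx]
    · rw [show G0 ++ (G1 ++ (G2 ++ (G3 ++ G4))) = (G0 ++ G1 ++ G2 ++ G3 ++ G4) ++ [] by simp]
      rw [pvInsertBy_append_left _ x _ _ (by
        intro y hy
        simp only [List.mem_append] at hy
        rcases hy with (((hy | hy) | hy) | hy) | hy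
        · simp [hx, h0 y hy]
        · simp [hx, h1 y hy]
        · simp [hx, h2 y hy]
        · simp [hx, h3 y hy]
        · simp [hx, h4 y hy])]
      rw [pvInsertBy_all_before _ x _ (by intro y hy; simp at hy)]
      have := ih G0 G1 G2 G3 (G4 ++ [x]) h0 h1 h2 h3
        (by intro y hy; rcases List.mem_append.1 hy with hy | hy; exact h4 y hy; simp at hy; subst hy; exact hx)
      rw [show (G0 ++ G1 ++ G2 ++ G3 ++ G4) ++ [x] = G0 ++ (G1 ++ (G2 ++ (G3 ++ (G4 ++ [x])))) by simp]
      rw [this]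
      simp [pvF, hx]

lemma pvSorted_eq_buckets (xs : List String) :
    PySem.List.sorted xs pvPriority false
      = pvF 0 xs ++ pvF 1 xs ++ pvF 2 xs ++ pvF 3 xs ++ pvF 4 xs := by
  rw [PySem.List.sorted_eq_foldl_insertBy]
  have := pvSorted_aux xs [] [] [] [] [] (by simp) (by simp) (by simp) (by simp) (by simp)
  simpa using this

-- ===== VERDICT (by name: the statement is the Claim_ definition above) =====
theorem order_rule_ids_spec : Claim_equal_order_rule_ids := by
  intro rule_ids _
  unfold Spec_order_rule_ids order_rule_ids order_rule_ids_alt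
  rw [pvA_foldl rule_ids [] [] [] [] [], pvSorted_eq_buckets]
  simp
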